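-- pv_equiv track=rewrite | github.com/RomanSafe/studying_of_algorithms | largest_sequence/largest_divider_seq.py | divider_seq
-- ===== SOURCE A (Python) =====
-- def divider_seq(n, array):
--     count_array = [1] * n
--     for i in range(n):
--         for j in range(0, i):
--             if array[i] % array[j] == 0 and count_array[j] + 1 > count_array[i]:
--                 count_array[i] = count_array[j] + 1
--     counter_k = 0
--     for i in range(n):
--         counter_k = max(counter_k, count_array[i])
--     return counter_k
-- ===== SOURCE B (Python) =====
-- def divider_seq(n, array):
--     # Memoized top-down recursion: best(i) = length of the longest
--     # divisibility chain (in array order) ending at index i.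
--     memo = {}
--
--     def best(i):
--         if i not in memo:
--             memo[i] = 1 + max((best(j) for j in range(i)
--                                if array[i] % array[j] == 0), default=0)
--         return memo[i]
--
--     return max((best(i) for i in range(n)), default=0)
-- ===== Notes on version B (the rewrite author's own statement) =====
-- stated objective: alternative
-- what changed: Replaces the bottom-up DP over a mutable count array (conditional in-place updates plus a separate running-max pass) by a memoized top-down recursion best(i) = 1 + max over dividing predecessors, combined with max(..., default=0) at the top level.
import Mathlib
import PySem

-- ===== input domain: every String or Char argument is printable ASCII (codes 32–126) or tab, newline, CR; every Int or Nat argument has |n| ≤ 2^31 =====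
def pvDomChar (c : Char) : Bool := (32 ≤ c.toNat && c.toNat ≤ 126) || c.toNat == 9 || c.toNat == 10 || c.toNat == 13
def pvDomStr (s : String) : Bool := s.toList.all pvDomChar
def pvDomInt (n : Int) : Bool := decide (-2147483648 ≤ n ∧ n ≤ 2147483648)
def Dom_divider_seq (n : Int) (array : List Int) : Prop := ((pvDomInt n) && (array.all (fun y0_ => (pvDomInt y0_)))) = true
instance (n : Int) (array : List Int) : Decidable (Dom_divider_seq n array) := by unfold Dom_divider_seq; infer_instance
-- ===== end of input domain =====

-- B replaces A's bottom-up DP over a mutable count array by a memoized top-down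
-- recursion best(i) (alternative decomposition, same asymptotic cost).

-- ===== PORT A =====
-- Indexing: all indices come from range(n)/range(i), hence are nonnegative, and
-- Pre_ guarantees they are in bounds wherever Python evaluates array[...], so
-- List.getD is exact there.
def divider_seq (n : Int) (array : List Int) : Int :=
  let N := n.toNat
  let count_array :=
    (List.range N).foldl (fun c i =>
      (List.range i).foldl (fun c j =>
        if PySem.Int.mod (array.getD i 0) (array.getD j 0) = 0 ∧
            c.getD j 0 + 1 > c.getD i 0
        then c.set i (c.getD j 0 + 1) else c) c)
      (List.replicate N (1 : Int))
  (List.range N).foldl (fun counter_k i => max counter_k (count_array.getD i 0)) 0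

-- ===== PORT B =====
-- best(i) = 1 + max((best(j) for j in range(i) if array[i] % array[j] == 0), default=0)
def bestB (array : List Int) (i : Nat) : Int :=
  1 + PySem.List.maxD
        ((List.range i).attach.filterMap (fun j =>
          if PySem.Int.mod (array.getD i 0) (array.getD j.1 0) = 0
          then some (bestB array j.1) else none))
        (fun x => x) 0
termination_by i
decreasing_by exact List.mem_range.mp j.2

-- return max((best(i) for i in range(n)), default=0)
def divider_seq_alt (n : Int) (array : List Int) : Int :=
  PySem.List.maxD ((List.range n.toNat).map (bestB array)) (fun x => x) 0

-- ===== PRECONDITION & SPEC =====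
-- Pre_ excludes exactly the inputs where Python A raises: an IndexError when
-- n ≥ 2 and n > len(array) (A touches array only for indices 1..n-1), and a
-- ZeroDivisionError when some array[j] with j < n-1 is 0.
def Pre_divider_seq (n : Int) (array : List Int) : Prop :=
  (n ≤ (array.length : Int) ∨ n ≤ 1) ∧ ∀ x ∈ array.take (n - 1).toNat, x ≠ 0
instance (n : Int) (array : List Int) : Decidable (Pre_divider_seq n array) := by
  unfold Pre_divider_seq; infer_instance

def pvWitness_divider_seq : Int × List Int := (4, [2, 3, 4, 8])

def Spec_divider_seq (n : Int) (array : List Int) (out : Int) : Prop := out = divider_seq_alt n array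
instance (n : Int) (array : List Int) (out : Int) : Decidable (Spec_divider_seq n array out) := by unfold Spec_divider_seq; infer_instance

-- ===== CLAIM (what is proved, stated in full; the proofs are below) =====
def Claim_equal_divider_seq : Prop := ∀ (n : Int) (array : List Int), Dom_divider_seq n array → Pre_divider_seq n array → Spec_divider_seq n array (divider_seq n array)

-- ===== LEMMAS AND PROOFS =====

-- `if x + 1 > v then x + 1 else v` is a running max.
theorem runmax_eq (P : Nat → Prop) [DecidablePred P] (f : Nat → Int) (l : List Nat) (v0 : Int) :
    l.foldl (fun v j => if P j ∧ f j + 1 > v then f j + 1 else v) v0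
      = l.foldl (fun v j => if P j then max v (f j + 1) else v) v0 := by
  have h : (fun (v : Int) (j : Nat) => if P j ∧ f j + 1 > v then f j + 1 else v)
      = fun v j => if P j then max v (f j + 1) else v := by
    funext v j
    by_cases hp : P j
    · simp only [hp, true_and, if_true, max_def]
      split_ifs <;> omega
    · simp [hp]
  rw [h]

-- Shifting the accumulator and the values by 1 commutes with the running max.
theorem foldl_max_shift (P : Nat → Prop) [DecidablePred P] (f : Nat → Int) (l : List Nat) (v : Int) :
    l.foldl (fun v j => if P j then max v (f j + 1) else v) (v + 1)
      = l.foldl (fun v j => if P j then max v (f j) else v) v + 1 := by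
  induction l generalizing v with
  | nil => rfl
  | cons a t ih =>
    simp only [List.foldl_cons]
    by_cases hp : P a
    · simp only [if_pos hp]
      rw [show max (v + 1) (f a + 1) = max v (f a) + 1 from max_add_add_right v (f a) 1]
      exact ih (max v (f a))
    · simp only [hp, if_false]
      exact ih v

-- max(l, default=0) for a list of nonnegative integers is the running-max loop.
theorem maxD_id_nonneg_eq_foldl (l : List Int) (h : ∀ x ∈ l, 0 ≤ x) :
    PySem.List.maxD l (fun x => x) 0 = l.foldl max 0 := by
  cases l with
  | nil => rfl
  | cons x t =>
    have hx : 0 ≤ x := h x (by simp)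
    simp [PySem.List.maxD, PySem.List.max?_id_cons, max_eq_right hx]

-- The list B's generator materializes, without the `attach` bookkeeping.
theorem bestB_cands (array : List Int) (i : Nat) :
    ((List.range i).attach.filterMap (fun j =>
        if PySem.Int.mod (array.getD i 0) (array.getD j.1 0) = 0
        then some (bestB array j.1) else none))
      = (List.range i).filterMap (fun j =>
          if PySem.Int.mod (array.getD i 0) (array.getD j 0) = 0
          then some (bestB array j) else none) := by
  simp only [List.filterMap_subtype, List.unattach_attach]

theorem bestB_pos (array : List Int) : ∀ i, 1 ≤ bestB array i := by
  intro i
  induction i using Nat.strong_induction_on with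
  | _ i ih =>
    rw [bestB, bestB_cands]
    have hmem : ∀ x ∈ (List.range i).filterMap (fun j =>
        if PySem.Int.mod (array.getD i 0) (array.getD j 0) = 0
        then some (bestB array j) else none), 0 ≤ x := by
      intro x hx
      obtain ⟨j, hj, hx⟩ := List.mem_filterMap.mp hx
      split at hx
      · cases hx; exact le_trans zero_le_one (ih j (List.mem_range.mp hj))
      · cases hx
    rw [maxD_id_nonneg_eq_foldl _ hmem]
    have := (PySem.List.le_foldl_max ((List.range i).filterMap (fun j =>
        if PySem.Int.mod (array.getD i 0) (array.getD j 0) = 0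
        then some (bestB array j) else none)) 0).1
    omega

-- best(i) as a running max over range(i).
theorem bestB_eq (array : List Int) (i : Nat) :
    bestB array i
      = 1 + (List.range i).foldl (fun v j =>
          if PySem.Int.mod (array.getD i 0) (array.getD j 0) = 0
          then max v (bestB array j) else v) 0 := by
  rw [bestB, bestB_cands]
  have hmem : ∀ x ∈ (List.range i).filterMap (fun j =>
      if PySem.Int.mod (array.getD i 0) (array.getD j 0) = 0
      then some (bestB array j) else none), 0 ≤ x := by
    intro x hx
    obtain ⟨j, _, hx⟩ := List.mem_filterMap.mp hx
    split at hx
    · cases hx; exact le_trans zero_le_one (bestB_pos array j)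
    · cases hx
  rw [maxD_id_nonneg_eq_foldl _ hmem, List.foldl_filterMap]
  congr 1
  exact PySem.List.foldl_congr_mem (List.range i) _ _ 0 (fun v j _ => by
    by_cases h : PySem.Int.mod (array.getD i 0) (array.getD j 0) = 0
    · rw [if_pos h, if_pos h]
    · rw [if_neg h, if_neg h])

-- A's inner loop only rewrites index i, reading indices < i from the original list.
theorem inner_fold (P : Nat → Prop) [DecidablePred P] (i : Nat) :
    ∀ (js : List Nat) (c : List Int), (∀ j ∈ js, j < i) → i < c.length →
      js.foldl (fun c j => if P j ∧ c.getD j 0 + 1 > c.getD i 0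
          then c.set i (c.getD j 0 + 1) else c) c
        = c.set i (js.foldl (fun v j => if P j ∧ c.getD j 0 + 1 > v
            then c.getD j 0 + 1 else v) (c.getD i 0)) := by
  intro js
  induction js with
  | nil =>
    intro c _ hlen
    simp only [List.foldl_nil]
    rw [List.getD_eq_getElem c 0 hlen]
    exact (List.set_getElem_self hlen).symm
  | cons a t ih =>
    intro c hlt hlen
    simp only [List.foldl_cons]
    by_cases h : P a ∧ c.getD a 0 + 1 > c.getD i 0
    · rw [if_pos h]
      set c' := c.set i (c.getD a 0 + 1) with hc'
      have hlen' : i < c'.length := by simpa [hc'] using hlen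
      rw [ih c' (fun j hj => hlt j (List.mem_cons_of_mem a hj)) hlen']
      have hgi : c'.getD i 0 = c.getD a 0 + 1 := by
        simp [hc', List.getD, hlen]
      have hgj : ∀ j, j < i → c'.getD j 0 = c.getD j 0 := by
        intro j hj
        simp [hc', List.getD, List.getElem?_set_ne (by omega : i ≠ j)]
      rw [hc', List.set_set, hgi]
      congr 1
      rw [if_pos h]
      exact PySem.List.foldl_congr_mem t _ _ _ (fun v j hj => by
        rw [hgj j (hlt j (List.mem_cons_of_mem a hj))])
    · rw [if_neg h, if_neg h]
      exact ih c (fun j hj => hlt j (List.mem_cons_of_mem a hj)) hlen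

-- The outer-loop invariant: after m iterations the first m cells hold best(k),
-- the remaining cells still hold 1.
theorem outer_inv (array : List Int) (N : Nat) :
    ∀ m, m ≤ N →
      let C := (List.range m).foldl (fun c i =>
        (List.range i).foldl (fun c j =>
          if PySem.Int.mod (array.getD i 0) (array.getD j 0) = 0 ∧
              c.getD j 0 + 1 > c.getD i 0
          then c.set i (c.getD j 0 + 1) else c) c)
        (List.replicate N (1 : Int))
      C.length = N ∧ ∀ k, k < N →
        C.getD k 0 = if k < m then bestB array k else 1 := by
  intro m
  induction m with
  | zero =>
    intro _
    refine ⟨List.length_replicate, fun k hk => ?_⟩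
    rw [if_neg (Nat.not_lt_zero k)]
    exact List.getD_replicate 1 hk
  | succ m ih =>
    intro hm
    obtain ⟨hlen, hval⟩ := ih (Nat.le_of_succ_le hm)
    have hmN : m < N := hm
    simp only [List.range_succ, List.foldl_append, List.foldl_cons, List.foldl_nil]
    set C := (List.range m).foldl (fun c i =>
        (List.range i).foldl (fun c j =>
          if PySem.Int.mod (array.getD i 0) (array.getD j 0) = 0 ∧
              c.getD j 0 + 1 > c.getD i 0
          then c.set i (c.getD j 0 + 1) else c) c)
        (List.replicate N (1 : Int)) with hC
    have hlenm : m < C.length := by rw [hlen]; exact hmN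
    rw [inner_fold (fun j => PySem.Int.mod (array.getD m 0) (array.getD j 0) = 0)
        m (List.range m) C (fun j hj => List.mem_range.mp hj) hlenm]
    have hCm : C.getD m 0 = 1 := by
      rw [hval m hmN]; simp
    have hCj : ∀ j ∈ List.range m, C.getD j 0 = bestB array j := by
      intro j hj
      have hjm := List.mem_range.mp hj
      rw [hval j (lt_trans hjm hmN)]
      simp [hjm]
    have hrun : (List.range m).foldl (fun v j =>
        if PySem.Int.mod (array.getD m 0) (array.getD j 0) = 0 ∧ C.getD j 0 + 1 > v
        then C.getD j 0 + 1 else v) (C.getD m 0) = bestB array m := by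
      rw [hCm]
      rw [PySem.List.foldl_congr_mem (List.range m) _
        (fun v j => if PySem.Int.mod (array.getD m 0) (array.getD j 0) = 0 ∧
            bestB array j + 1 > v then bestB array j + 1 else v) 1
        (fun v j hj => by rw [hCj j hj])]
      rw [runmax_eq (fun j => PySem.Int.mod (array.getD m 0) (array.getD j 0) = 0)
        (bestB array) (List.range m) 1]
      have hs := foldl_max_shift (fun j => PySem.Int.mod (array.getD m 0) (array.getD j 0) = 0)
        (bestB array) (List.range m) 0
      rw [zero_add] at hs
      rw [hs, bestB_eq array m]
      exact add_comm _ 1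
    rw [hrun]
    refine ⟨by simpa using hlen, fun k hk => ?_⟩
    by_cases hkm : k = m
    · subst hkm
      simp [List.getD, hlenm]
    · rw [show ((C.set m (bestB array m)).getD k 0) = C.getD k 0 by
        simp [List.getD, List.getElem?_set_ne (by omega : m ≠ k)]]
      rw [hval k hk]
      have : k < m + 1 ↔ k < m := by omega
      simp only [this]

-- ===== VERDICT (by name: the statement is the Claim_ definition above) =====
theorem divider_seq_spec : Claim_equal_divider_seq := by
  intro n array _ _
  unfold Spec_divider_seq divider_seq divider_seq_alt
  set N := n.toNat with hN
  obtain ⟨hlen, hval⟩ := outer_inv array N N (le_refl N)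
  rw [PySem.List.foldl_congr_mem (List.range N) _
    (fun counter_k i => max counter_k (bestB array i)) 0
    (fun acc i hi => by
      rw [hval i (List.mem_range.mp hi)]
      simp [List.mem_range.mp hi])]
  rw [maxD_id_nonneg_eq_foldl _ (fun x hx => by
    obtain ⟨j, _, hj⟩ := List.mem_map.mp hx
    exact hj ▸ le_trans zero_le_one (bestB_pos array j))]
  exact List.foldl_map.symm
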